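-- pv_equiv track=rewrite | github.com/Marco-26/alpr | backend/ml/scripts/utils.py | position_scoring
-- ===== SOURCE A (Python) =====
-- patterns = {
--   'format_2005':{
--     'example': '41-BE-81',
--     'regex': r'^[0-9]{2}[A-Z]{2}[0-9]{2}$',
--     'letter_pos': [2,3],
--     'number_pos': [0,1,4,5]
--   },
--   'format_2020':{
--     'example': 'AA-16-AA',
--     'regex': r'^[A-Z]{2}[0-9]{2}[A-Z]{2}$',
--     'letter_pos': [0,1,4,5],
--     'number_pos': [2,3]
--   }
-- }
--
-- def position_scoring(normalized_plate) -> str: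
--   """
--     normalized plates dont have dashes
--   """
--   scores = []
--   for name, pattern in patterns.items():
--     current_score = 0
--     for index, letter in enumerate(normalized_plate):
--       if (letter.isdigit() and index in pattern["number_pos"]) or (not letter.isdigit() and index in pattern["letter_pos"]):
--         current_score +=1
--     scores.append((name, current_score))
--   best = max(scores, key=lambda x: x[1])
--   pattern, _ = best
--   return pattern
-- ===== SOURCE B (Python) =====
-- def position_scoring(normalized_plate) -> str:
--   """
--     normalized plates dont have dashes
--   """
--   # Each of the first six positions favours exactly one format (digit at
--   # 0,1,4,5 -> 2005, non-digit there -> 2020; reversed at 2,3), and positions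
--   # beyond 5 favour neither, so a single signed tally decides: vote is the
--   # 2005-score minus the 2020-score, and ties (vote == 0) go to format_2005.
--   vote = 0
--   for index, ch in enumerate(normalized_plate[:6]):
--     expects_digit = index < 2 or index > 3
--     vote += 1 if ch.isdigit() == expects_digit else -1
--   return 'format_2005' if vote >= 0 else 'format_2020'
-- ===== Notes on version B (the rewrite author's own statement) =====
-- stated objective: faster
-- what changed: Instead of scoring two patterns over the whole plate and taking max, B keeps one signed vote over only the first six characters (+1 if the character matches format_2005's positional expectation, -1 otherwise; valid because every position in 0..5 favours exactly one format and later positions favour neither) and returns format_2005 iff the vote is nonnegative.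
import Mathlib
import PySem

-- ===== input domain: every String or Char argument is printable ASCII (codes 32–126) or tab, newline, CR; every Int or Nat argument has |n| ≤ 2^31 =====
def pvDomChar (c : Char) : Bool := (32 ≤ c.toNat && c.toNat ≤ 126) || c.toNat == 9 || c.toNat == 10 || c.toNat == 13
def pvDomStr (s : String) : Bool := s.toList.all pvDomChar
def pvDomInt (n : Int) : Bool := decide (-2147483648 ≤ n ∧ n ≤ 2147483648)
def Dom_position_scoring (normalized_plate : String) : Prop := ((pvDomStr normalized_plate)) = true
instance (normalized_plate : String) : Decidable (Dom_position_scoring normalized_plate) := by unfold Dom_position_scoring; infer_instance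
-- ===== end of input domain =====

-- B replaces the two-pattern scoring + max(key=...) by a single signed vote over the first six characters, decided by sign (only a bounded prefix is read; a timing run measured B faster).


-- ===== PORT A =====
structure PvPattern where
  example' : String
  regex : String
  letter_pos : List Int
  number_pos : List Int
deriving DecidableEq, Repr

def pvPatterns : PySem.Dict String PvPattern :=
  (PySem.Dict.empty.insert "format_2005" ⟨"41-BE-81", "^[0-9]{2}[A-Z]{2}[0-9]{2}$", [2,3], [0,1,4,5]⟩).insert
    "format_2020" ⟨"AA-16-AA", "^[A-Z]{2}[0-9]{2}[A-Z]{2}$", [0,1,4,5], [2,3]⟩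

def position_scoring (normalized_plate : String) : String :=
  let scores := pvPatterns.items.foldl
    (fun scores np =>
      let current_score := (PySem.List.enumerate normalized_plate.toList 0).foldl
        (fun cur il =>
          if (PySem.Chars.isdigit il.2 && decide (il.1 ∈ np.2.number_pos)) ||
             (!PySem.Chars.isdigit il.2 && decide (il.1 ∈ np.2.letter_pos)) then cur + 1 else cur)
        (0 : Int)
      scores ++ [(np.1, current_score)])
    ([] : List (String × Int))
  -- Python's max raises only on an empty list; scores always has two elements, so the none arm is unreachable
  match PySem.List.max? scores (fun x => x.2) with
  | some best => best.1
  | none => ""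

-- ===== PORT B =====
def position_scoring_alt (normalized_plate : String) : String :=
  let vote := (PySem.List.enumerate (PySem.List.slice normalized_plate.toList none (some 6)) 0).foldl
    (fun (v : Int) ic =>
      let expects_digit : Bool := decide (ic.1 < 2) || decide (ic.1 > 3)
      if PySem.Chars.isdigit ic.2 == expects_digit then v + 1 else v - 1)
    (0 : Int)
  if vote ≥ 0 then "format_2005" else "format_2020"

-- ===== PRECONDITION & SPEC =====
def Spec_position_scoring (normalized_plate : String) (out : String) : Prop := out = position_scoring_alt normalized_plate
instance (normalized_plate : String) (out : String) : Decidable (Spec_position_scoring normalized_plate out) := by unfold Spec_position_scoring; infer_instance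

-- ===== CLAIM (what is proved, stated in full; the proofs are below) =====
def Claim_equal_position_scoring : Prop := ∀ (normalized_plate : String), Dom_position_scoring normalized_plate → Spec_position_scoring normalized_plate (position_scoring normalized_plate)

-- ===== LEMMAS AND PROOFS =====

-- A's per-character increments (one per format) and B's vote step, as named functions
def pvStepA (cur : Int) (il : Int × Char) : Int :=
  if (PySem.Chars.isdigit il.2 && decide (il.1 ∈ ([0,1,4,5] : List Int))) ||
     (!PySem.Chars.isdigit il.2 && decide (il.1 ∈ ([2,3] : List Int))) then cur + 1 else cur

def pvStepB (cur : Int) (il : Int × Char) : Int :=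
  if (PySem.Chars.isdigit il.2 && decide (il.1 ∈ ([2,3] : List Int))) ||
     (!PySem.Chars.isdigit il.2 && decide (il.1 ∈ ([0,1,4,5] : List Int))) then cur + 1 else cur

def pvStepV (v : Int) (ic : Int × Char) : Int :=
  if PySem.Chars.isdigit ic.2 == (decide (ic.1 < 2) || decide (ic.1 > 3)) then v + 1 else v - 1

-- On pairs whose index lies in [0,6), the difference of A's two scores evolves exactly as B's vote.
theorem pv_vote_eq (ps : List (Int × Char)) (h : ∀ p ∈ ps, 0 ≤ p.1 ∧ p.1 < 6) :
    ∀ (a b : Int), ps.foldl pvStepA a - ps.foldl pvStepB b = ps.foldl pvStepV (a - b) := by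
  induction ps with
  | nil => intro a b; simp
  | cons p t ih =>
    intro a b
    have hp := h p (List.mem_cons_self)
    have ht : ∀ q ∈ t, 0 ≤ q.1 ∧ q.1 < 6 := fun q hq => h q (List.mem_cons_of_mem _ hq)
    simp only [List.foldl_cons]
    rw [ih ht]
    congr 1
    obtain ⟨i, c⟩ := p
    obtain ⟨hp0, hp6⟩ := hp
    simp only at hp0 hp6
    unfold pvStepA pvStepB pvStepV
    cases hd : PySem.Chars.isdigit c <;> interval_cases i <;> simp <;> omega

-- Pairs with index ≥ 6 leave both of A's scores unchanged.
theorem pv_high_id (ps : List (Int × Char)) (h : ∀ p ∈ ps, 6 ≤ p.1) :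
    ∀ a : Int, ps.foldl pvStepA a = a ∧ ps.foldl pvStepB a = a := by
  induction ps with
  | nil => intro a; exact ⟨rfl, rfl⟩
  | cons p t ih =>
    intro a
    have hp := h p (List.mem_cons_self)
    have ht : ∀ q ∈ t, 6 ≤ q.1 := fun q hq => h q (List.mem_cons_of_mem _ hq)
    have hA : pvStepA a p = a := by
      unfold pvStepA
      have h1 : ¬ (p.1 ∈ ([0,1,4,5] : List Int)) := by simp; omega
      have h2 : ¬ (p.1 ∈ ([2,3] : List Int)) := by simp; omega
      simp [h1, h2]
    have hB : pvStepB a p = a := by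
      unfold pvStepB
      have h1 : ¬ (p.1 ∈ ([0,1,4,5] : List Int)) := by simp; omega
      have h2 : ¬ (p.1 ∈ ([2,3] : List Int)) := by simp; omega
      simp [h1, h2]
    simp only [List.foldl_cons, hA, hB]
    exact ih ht a

-- max over A's two-element scores list picks the first on ties
theorem pv_max2 (a b : String) (x y : Int) :
    PySem.List.max? [(a,x),(b,y)] (fun p => p.2) = some (if x < y then (b,y) else (a,x)) := by
  by_cases h : x < y <;> simp [PySem.List.max?, List.foldl, h]

-- ===== VERDICT (by name: the statement is the Claim_ definition above) =====
theorem position_scoring_spec : Claim_equal_position_scoring := by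
  intro s _
  unfold Spec_position_scoring position_scoring position_scoring_alt
  have hitems : pvPatterns.items =
      [("format_2005", ⟨"41-BE-81", "^[0-9]{2}[A-Z]{2}[0-9]{2}$", [2,3], [0,1,4,5]⟩),
       ("format_2020", ⟨"AA-16-AA", "^[A-Z]{2}[0-9]{2}[A-Z]{2}$", [0,1,4,5], [2,3]⟩)] := by rfl
  rw [hitems]
  simp only [List.foldl, List.nil_append, List.singleton_append]
  -- name the enumerated lists
  set l := s.toList with hl
  have hslice : PySem.List.slice l none (some 6) = l.take 6 := by
    simpa using PySem.List.slice_to l (b := 6) (by norm_num)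
  rw [hslice]
  have hsplit : l = l.take 6 ++ l.drop 6 := (List.take_append_drop 6 l).symm
  have henum : PySem.List.enumerate l 0 =
      PySem.List.enumerate (l.take 6) 0 ++ PySem.List.enumerate (l.drop 6) (0 + (l.take 6).length) := by
    conv_lhs => rw [hsplit]
    exact PySem.List.enumerate_append _ _ _
  have hlowbound : ∀ p ∈ PySem.List.enumerate (l.take 6) 0, 0 ≤ p.1 ∧ p.1 < 6 := by
    intro p hp
    rw [PySem.List.mem_enumerate_iff] at hp
    obtain ⟨k, hk, rfl⟩ := hp
    have : k < 6 := lt_of_lt_of_le hk (by simp)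
    simp; omega
  have hhighbound : ∀ p ∈ PySem.List.enumerate (l.drop 6) (0 + (l.take 6).length), 6 ≤ p.1 := by
    intro p hp
    rw [PySem.List.mem_enumerate_iff] at hp
    obtain ⟨k, hk, rfl⟩ := hp
    have hne : l.drop 6 ≠ [] := by intro h; rw [h] at hk; simp at hk
    have h6 : 6 ≤ l.length := by
      by_contra h
      exact hne (List.drop_eq_nil_of_le (by omega))
    have h6' : (l.take 6).length = 6 := by simp [List.length_take]; omega
    simp only [h6']; omega
  -- A's two scores in terms of the first-six part only
  have hxA : ∀ a : Int, (PySem.List.enumerate l 0).foldl pvStepA a =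
      (PySem.List.enumerate (l.take 6) 0).foldl pvStepA a := by
    intro a
    rw [henum, List.foldl_append]
    exact (pv_high_id _ hhighbound _).1
  have hxB : ∀ a : Int, (PySem.List.enumerate l 0).foldl pvStepB a =
      (PySem.List.enumerate (l.take 6) 0).foldl pvStepB a := by
    intro a
    rw [henum, List.foldl_append]
    exact (pv_high_id _ hhighbound _).2
  have hA' : ((PySem.List.enumerate l 0).foldl
      (fun cur il =>
        if (PySem.Chars.isdigit il.2 && decide (il.1 ∈ ([0,1,4,5] : List Int))) ||
           (!PySem.Chars.isdigit il.2 && decide (il.1 ∈ ([2,3] : List Int))) then cur + 1 else cur)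
      (0 : Int)) = (PySem.List.enumerate (l.take 6) 0).foldl pvStepA 0 := hxA 0
  have hB' : ((PySem.List.enumerate l 0).foldl
      (fun cur il =>
        if (PySem.Chars.isdigit il.2 && decide (il.1 ∈ ([2,3] : List Int))) ||
           (!PySem.Chars.isdigit il.2 && decide (il.1 ∈ ([0,1,4,5] : List Int))) then cur + 1 else cur)
      (0 : Int)) = (PySem.List.enumerate (l.take 6) 0).foldl pvStepB 0 := hxB 0
  rw [hA', hB', pv_max2]
  have hvote : (PySem.List.enumerate (l.take 6) 0).foldl pvStepA 0 -
      (PySem.List.enumerate (l.take 6) 0).foldl pvStepB 0 =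
      (PySem.List.enumerate (l.take 6) 0).foldl pvStepV 0 := by
    simpa using pv_vote_eq _ hlowbound 0 0
  have hvB : ((PySem.List.enumerate (l.take 6) 0).foldl
      (fun (v : Int) ic =>
        if PySem.Chars.isdigit ic.2 == (decide (ic.1 < 2) || decide (ic.1 > 3)) then v + 1 else v - 1)
      (0 : Int)) = (PySem.List.enumerate (l.take 6) 0).foldl pvStepV 0 := rfl
  rw [hvB]
  split_ifs with h1 h2 <;> first | rfl | omega
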